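-- pv_equiv track=rewrite | github.com/lexoz-bedra/algorithms-ICT | s2/2-1-greedy_DP/2-1-zhadnye-algoritmy-dinamicheskoe-programmirovanie-lexoz-bedra-main/Дополнительные задачи/task12.py | two_subsequences
-- ===== SOURCE A (Python) =====
-- def two_subsequences(n: int, arr: list[int]) -> list[int]:
--     total_sum = sum(arr)
--     if total_sum % 2 != 0:
--         return [-1]
--     half_sum = total_sum // 2
--     dp = [[False] * (half_sum + 1) for _ in range(n + 1)]
--     for i in range(n + 1):
--         dp[i][0] = True
--     for i in range(1, n + 1):
--         for j in range(1, half_sum + 1):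
--             if j >= arr[i - 1]:
--                 dp[i][j] = dp[i - 1][j] or dp[i - 1][j - arr[i - 1]]
--             else:
--                 dp[i][j] = dp[i - 1][j]
--     if not dp[n][half_sum]:
--         return [-1]
--     i, j = n, half_sum
--     result = []
--     while i > 0 and j > 0:
--         if not dp[i-1][j]:
--             result.append(arr[i-1])
--             j -= arr[i-1]
--         i -= 1
--     return result
-- ===== SOURCE B (Python) =====
-- def two_subsequences(n: int, arr: list[int]) -> list[int]:
--     total_sum = sum(arr)
--     if total_sum % 2 != 0:
--         return [-1]
--     half_sum = total_sum // 2
--     # first[s] = smallest prefix length whose subset sums to s (s kept in [0, half_sum])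
--     first = {0: 0}
--     for i in range(1, n + 1):
--         a = arr[i - 1]
--         for j in list(first):
--             t = j + a
--             if 0 <= t <= half_sum and t not in first:
--                 first[t] = i
--     if half_sum not in first:
--         return [-1]
--     result = []
--     j = half_sum
--     for i in range(n, 0, -1):
--         if first[j] == i:
--             result.append(arr[i - 1])
--             j -= arr[i - 1]
--     return result
-- ===== Notes on version B (the rewrite author's own statement) =====
-- stated objective: alternative
-- what changed: A fills a dense (n+1)x(half+1) boolean table row by row and backtracks over it; B instead keeps ONE dict mapping each reachable subset sum (within [0, half]) to the EARLIEST prefix length achieving it, built in a single forward pass over the array, and reconstructs by taking arr[i-1] exactly when first[j] == i.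
-- outside the precondition, e.g. on two_subsequences(3, [0]): A returns [], B raises IndexError; on two_subsequences(3, [2, 1, -1]): A returns [1], B returns [1]
import Mathlib
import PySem

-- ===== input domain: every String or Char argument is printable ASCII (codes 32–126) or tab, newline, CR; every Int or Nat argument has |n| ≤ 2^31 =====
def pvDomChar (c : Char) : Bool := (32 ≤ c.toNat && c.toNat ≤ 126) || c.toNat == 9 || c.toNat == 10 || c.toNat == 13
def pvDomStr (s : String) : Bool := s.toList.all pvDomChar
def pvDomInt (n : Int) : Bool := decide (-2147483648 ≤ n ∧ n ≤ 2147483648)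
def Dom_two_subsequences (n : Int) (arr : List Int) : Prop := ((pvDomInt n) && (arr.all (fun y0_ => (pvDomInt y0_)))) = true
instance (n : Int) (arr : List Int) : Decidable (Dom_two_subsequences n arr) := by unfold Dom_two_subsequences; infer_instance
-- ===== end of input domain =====

-- B replaces A's dense (n+1)x(half+1) boolean DP table by ONE dict mapping each reachable
-- subset sum (kept in [0, half]) to the EARLIEST prefix length achieving it, built in a
-- single forward pass; the reconstruction takes arr[i-1] exactly when first[j] == i.

-- ===== PORT A =====
-- A's dp table is a list of row lists; dp[i][j] reads/writes go through pvGet2/pvSet2.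
-- Reads use PySem.List.pyGet? (with a default that is never reached on Pre_, where every
-- index A uses is in range and nonnegative); writes use List.set at the same indices.
def pvGet2 (dp : List (List Bool)) (i j : Int) : Bool :=
  (PySem.List.pyGet? ((PySem.List.pyGet? dp i).getD []) j).getD false

def pvSet2 (dp : List (List Bool)) (i j : Int) (v : Bool) : List (List Bool) :=
  dp.set i.toNat (((PySem.List.pyGet? dp i).getD []).set j.toNat v)

-- dp = [[False]*(half+1) for _ in range(n+1)]; for i in range(n+1): dp[i][0] = True
def pvInit (n half : Int) : List (List Bool) :=
  (PySem.List.pyRange 0 (n+1) 1).foldl (fun dp i => pvSet2 dp i 0 true)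
    (List.replicate (n+1).toNat (List.replicate (half+1).toNat false))

-- body of the inner j-loop for row i
def pvInnerF (arr : List Int) (i : Int) (dp : List (List Bool)) (j : Int) : List (List Bool) :=
  let a := (PySem.List.pyGet? arr (i-1)).getD 0
  if j ≥ a then pvSet2 dp i j (pvGet2 dp (i-1) j || pvGet2 dp (i-1) (j-a))
  else pvSet2 dp i j (pvGet2 dp (i-1) j)

-- for j in range(1, half_sum+1): …
def pvRowStep (arr : List Int) (half : Int) (dp : List (List Bool)) (i : Int) : List (List Bool) :=
  (PySem.List.pyRange 1 (half+1) 1).foldl (pvInnerF arr i) dp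

-- for i in range(1, n+1): …
def pvTable (n : Int) (arr : List Int) (half : Int) : List (List Bool) :=
  (PySem.List.pyRange 1 (n+1) 1).foldl (pvRowStep arr half) (pvInit n half)

-- while i > 0 and j > 0: …  (fuel = the initial i; the loop runs at most i iterations)
def pvWhileA (arr : List Int) (dp : List (List Bool)) : Nat → Int → Int → List Int → List Int
  | 0, _, _, acc => acc
  | k+1, i, j, acc =>
    if i > 0 ∧ j > 0 then
      if pvGet2 dp (i-1) j = false then
        let a := (PySem.List.pyGet? arr (i-1)).getD 0
        pvWhileA arr dp k (i-1) (j-a) (acc ++ [a])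
      else pvWhileA arr dp k (i-1) j acc
    else acc

def two_subsequences (n : Int) (arr : List Int) : List Int :=
  let total_sum := arr.sum
  if PySem.Int.mod total_sum 2 ≠ 0 then [-1]
  else
    let half_sum := PySem.Int.floordiv total_sum 2
    let dp := pvTable n arr half_sum
    if pvGet2 dp n half_sum = false then [-1]
    else pvWhileA arr dp n.toNat n half_sum []

-- ===== PORT B =====
-- inner loop of B: for j in list(first): t = j + a; if 0 <= t <= half and t not in first: first[t] = i
-- (the snapshot list(first) is first.keys; the membership test reads the updated dict)
def pvRowB (half i a : Int) (d : PySem.Dict Int Int) : PySem.Dict Int Int :=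
  d.keys.foldl (fun d' j =>
    let t := j + a
    if 0 ≤ t ∧ t ≤ half ∧ d'.contains t = false then d'.insert t i else d') d

-- first = {0: 0}; for i in range(1, n+1): a = arr[i-1]; <inner loop>
def pvBuildFirst (n : Int) (arr : List Int) (half : Int) : PySem.Dict Int Int :=
  (PySem.List.pyRange 1 (n+1) 1).foldl
    (fun d i => pvRowB half i ((PySem.List.pyGet? arr (i-1)).getD 0) d)
    (PySem.Dict.empty.insert 0 0)

-- body of the reconstruction loop: if first[j] == i: result.append(arr[i-1]); j -= arr[i-1]
def pvReconB (arr : List Int) (first : PySem.Dict Int Int)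
    (st : Int × List Int) (i : Int) : Int × List Int :=
  if (first.get? st.1).getD 0 = i then
    (st.1 - (PySem.List.pyGet? arr (i-1)).getD 0, st.2 ++ [(PySem.List.pyGet? arr (i-1)).getD 0])
  else st

def two_subsequences_alt (n : Int) (arr : List Int) : List Int :=
  let total_sum := arr.sum
  if PySem.Int.mod total_sum 2 ≠ 0 then [-1]
  else
    let half_sum := PySem.Int.floordiv total_sum 2
    let first := pvBuildFirst n arr half_sum
    if first.contains half_sum = false then [-1]
    else ((PySem.List.pyRange n 0 (-1)).foldl (pvReconB arr first) (half_sum, [])).2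

-- ===== PRECONDITION & SPEC =====
-- Pre_ excludes the inputs on which A's dp indexing can overrun (IndexError): n < 0,
-- n > len(arr), even-negative totals, and negative elements among arr[:n] with positive
-- even total.  On a minority of these A still returns because the `or` in the recurrence
-- short-circuits the out-of-range read (there B returns the same value anyway), and for
-- n > len(arr) with zero total A's empty inner loop masks the overrun and A returns []
-- while B raises IndexError.
def Pre_two_subsequences (n : Int) (arr : List Int) : Prop :=
  PySem.Int.mod arr.sum 2 ≠ 0 ∨
  (0 ≤ n ∧ n ≤ arr.length ∧
    (arr.sum = 0 ∨ (0 < arr.sum ∧ ∀ a ∈ arr.take n.toNat, 0 ≤ a)))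
instance (n : Int) (arr : List Int) : Decidable (Pre_two_subsequences n arr) := by
  unfold Pre_two_subsequences; infer_instance

def pvWitness_two_subsequences : Int × List Int := (2, [1, 1])

def Spec_two_subsequences (n : Int) (arr : List Int) (out : List Int) : Prop :=
  out = two_subsequences_alt n arr
instance (n : Int) (arr : List Int) (out : List Int) : Decidable (Spec_two_subsequences n arr out) := by
  unfold Spec_two_subsequences; infer_instance

-- ===== CLAIM (what is proved, stated in full; the proofs are below) =====
def Claim_equal_two_subsequences : Prop :=
  ∀ (n : Int) (arr : List Int), Dom_two_subsequences n arr →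
    Pre_two_subsequences n arr → Spec_two_subsequences n arr (two_subsequences n arr)

-- ===== LEMMAS AND PROOFS =====

-- proof-side spec: the set of subset sums of a prefix that are reachable inside [0, half]
def pvStep (half : Int) (c : PySem.Set Int) (a : Int) : PySem.Set Int :=
  PySem.Set.union c
    (PySem.Set.ofList ((c.filter (fun x => decide (0 ≤ x + a ∧ x + a ≤ half))).map (fun x => x + a)))

def pvS (half : Int) (l : List Int) : PySem.Set Int :=
  l.foldl (pvStep half) (PySem.Set.ofList [0])

theorem pv_mem_step (half : Int) (c : PySem.Set Int) (a j : Int) :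
    j ∈ pvStep half c a ↔ j ∈ c ∨ ∃ x ∈ c, x + a = j ∧ 0 ≤ j ∧ j ≤ half := by
  simp only [pvStep, PySem.Set.mem_union, PySem.Set.mem_ofList, List.mem_map,
    List.mem_filter]
  constructor
  · rintro (h | ⟨x, ⟨hx, hd⟩, rfl⟩)
    · exact Or.inl h
    · rw [decide_eq_true_eq] at hd
      exact Or.inr ⟨x, hx, rfl, hd⟩
  · rintro (h | ⟨x, hx, rfl, hd⟩)
    · exact Or.inl h
    · exact Or.inr ⟨x, ⟨hx, by rw [decide_eq_true_eq]; exact hd⟩, rfl⟩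

theorem pv_zero_mem (half : Int) (l : List Int) : ∀ (c : PySem.Set Int), 0 ∈ c →
    0 ∈ l.foldl (pvStep half) c := by
  induction l with
  | nil => intro c h; simpa using h
  | cons a t ih =>
    intro c h
    exact ih _ ((pv_mem_step half c a 0).2 (Or.inl h))

theorem pv_mem_foldl (half : Int) (l : List Int) : ∀ (c : PySem.Set Int) (x : Int), x ∈ c →
    x ∈ l.foldl (pvStep half) c := by
  induction l with
  | nil => intro c x h; simpa using h
  | cons a t ih =>
    intro c x h
    exact ih _ x ((pv_mem_step half c a x).2 (Or.inl h))

theorem pv_mono (half : Int) (l : List Int) (m : Nat) (j : Int)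
    (h : j ∈ pvS half (l.take m)) : j ∈ pvS half l := by
  have hsplit : l = l.take m ++ l.drop m := (List.take_append_drop m l).symm
  rw [pvS, hsplit, List.foldl_append]
  exact pv_mem_foldl half _ _ _ h

theorem pv_mono_take (half : Int) (l : List Int) (m k : Nat) (j : Int) (hmk : m ≤ k)
    (h : j ∈ pvS half (l.take m)) : j ∈ pvS half (l.take k) := by
  have h2 : (l.take k).take m = l.take m := by
    rw [List.take_take, Nat.min_eq_left hmk]
  exact pv_mono half (l.take k) m j (by rw [h2]; exact h)

theorem pv_bounds (half : Int) (l : List Int) : ∀ (c : PySem.Set Int),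
    (∀ x ∈ c, 0 ≤ x ∧ x ≤ half) →
    ∀ x ∈ l.foldl (pvStep half) c, 0 ≤ x ∧ x ≤ half := by
  induction l with
  | nil => intro c hc; simpa using hc
  | cons a t ih =>
    intro c hc
    refine ih _ ?_
    intro x hx
    rcases (pv_mem_step half c a x).1 hx with h | ⟨y, _, _, h1, h2⟩
    · exact hc x h
    · exact ⟨h1, h2⟩

theorem pv_step_char (half : Int) (c : PySem.Set Int) (a j : Int) (ha : 0 ≤ a)
    (hc : ∀ x ∈ c, 0 ≤ x) :
    j ∈ pvStep half c a ↔ j ∈ c ∨ (a ≤ j ∧ j ≤ half ∧ (j - a) ∈ c) := by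
  rw [pv_mem_step]
  constructor
  · rintro (h | ⟨x, hx, rfl, _, hle⟩)
    · exact Or.inl h
    · have := hc x hx
      exact Or.inr ⟨by omega, hle, by simpa using hx⟩
  · rintro (h | ⟨haj, hle, hmem⟩)
    · exact Or.inl h
    · have := hc _ hmem
      exact Or.inr ⟨j - a, hmem, by ring, by omega, hle⟩

def pvDims (dp : List (List Bool)) (R C : Nat) : Prop :=
  dp.length = R ∧ ∀ r ∈ dp, r.length = C

theorem pvRow_length (dp : List (List Bool)) (R C : Nat) (i : Int)
    (hd : pvDims dp R C) (hi : 0 ≤ i) (hiR : i.toNat < R) :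
    ((PySem.List.pyGet? dp i).getD []).length = C := by
  obtain ⟨hlen, hrows⟩ := hd
  have hcast : ((i.toNat:Nat):Int) = i := Int.toNat_of_nonneg hi
  rw [← hcast, PySem.List.pyGet?_natCast]
  have h : dp[i.toNat]? = some (dp[i.toNat]'(by omega)) := List.getElem?_eq_getElem _
  rw [h]
  exact hrows _ (List.getElem_mem _)

theorem pvSet2_dims (dp : List (List Bool)) (R C : Nat) (i j : Int) (v : Bool)
    (hd : pvDims dp R C) (hi : 0 ≤ i) (hiR : i.toNat < R) :
    pvDims (pvSet2 dp i j v) R C := by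
  obtain ⟨hlen, hrows⟩ := hd
  constructor
  · rw [pvSet2, List.length_set]; exact hlen
  · intro r hr
    rcases List.mem_or_eq_of_mem_set hr with h | h
    · exact hrows r h
    · rw [h, List.length_set]
      exact pvRow_length dp R C i ⟨hlen, hrows⟩ hi hiR

theorem pvGet2_natCast (dp : List (List Bool)) (iN jN : Nat) :
    pvGet2 dp (iN:Int) (jN:Int) = (dp[iN]?.getD [])[jN]?.getD false := by
  rw [pvGet2, PySem.List.pyGet?_natCast, PySem.List.pyGet?_natCast]

theorem pvGet2_set2 (dp : List (List Bool)) (R C : Nat) (i j i' j' : Int) (v : Bool)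
    (hd : pvDims dp R C) (hi : 0 ≤ i) (hiR : i.toNat < R) (hj : 0 ≤ j)
    (hjC : j.toNat < C) (hi' : 0 ≤ i') (hj' : 0 ≤ j') :
    pvGet2 (pvSet2 dp i j v) i' j' = if i' = i ∧ j' = j then v else pvGet2 dp i' j' := by
  have hrowlen : ((PySem.List.pyGet? dp i).getD []).length = C :=
    pvRow_length dp R C i hd hi hiR
  obtain ⟨hlen, hrows⟩ := hd
  lift i to Nat using hi with iN
  lift j to Nat using hj with jN
  lift i' to Nat using hi' with iN'
  lift j' to Nat using hj' with jN'
  rw [PySem.List.pyGet?_natCast] at hrowlen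
  simp only [Int.toNat_natCast] at hiR hjC
  rw [pvSet2, Int.toNat_natCast, Int.toNat_natCast, PySem.List.pyGet?_natCast]
  rw [pvGet2_natCast, pvGet2_natCast]
  rw [List.getElem?_set]
  by_cases hii : iN = iN'
  · subst hii
    rw [if_pos rfl, if_pos (by omega)]
    simp only [Option.getD_some]
    rw [List.getElem?_set]
    by_cases hjj : jN = jN'
    · subst hjj
      rw [if_pos rfl, if_pos (by omega)]
      simp
    · rw [if_neg hjj, if_neg (by simp [Nat.cast_inj]; omega)]
  · rw [if_neg hii, if_neg (by simp [Nat.cast_inj]; omega)]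

theorem pvGet2_base (R C : Nat) (i j : Int) :
    pvGet2 (List.replicate R (List.replicate C false)) i j = false := by
  rw [pvGet2]
  cases h : PySem.List.pyGet? (List.replicate R (List.replicate C false)) i with
  | none => simp [PySem.List.pyGet?, PySem.List.pyIdx?]
  | some r =>
    have hr : r ∈ List.replicate R (List.replicate C false) :=
      PySem.List.mem_of_pyGet?_eq_some _ h
    have : r = List.replicate C false := List.eq_of_mem_replicate hr
    subst this
    simp only [Option.getD_some]
    cases h2 : PySem.List.pyGet? (List.replicate C false) j with
    | none => simp
    | some b =>
      have : b = false := List.eq_of_mem_replicate (PySem.List.mem_of_pyGet?_eq_some _ h2)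
      simp [this]

theorem pv_init_fold (n half : Int) (l : List Int)
    (hel : ∀ x ∈ l, 0 ≤ x ∧ x < n+1) (hh : 0 ≤ half) :
    ∀ (dp : List (List Bool)), pvDims dp (n+1).toNat (half+1).toNat →
    pvDims (l.foldl (fun dp i => pvSet2 dp i 0 true) dp) (n+1).toNat (half+1).toNat
    ∧ ∀ (i j : Int), 0 ≤ i → 0 ≤ j →
      pvGet2 (l.foldl (fun dp i => pvSet2 dp i 0 true) dp) i j
      = if i ∈ l ∧ j = 0 then true else pvGet2 dp i j := by
  induction l with
  | nil => intro dp hd; exact ⟨hd, by intro i j _ _; simp⟩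
  | cons b t ih =>
    intro dp hd
    have hb := hel b List.mem_cons_self
    have hbR : b.toNat < (n+1).toNat := by omega
    have hd' : pvDims (pvSet2 dp b 0 true) (n+1).toNat (half+1).toNat :=
      pvSet2_dims dp _ _ b 0 true hd hb.1 hbR
    obtain ⟨ihd, ihv⟩ := ih (fun x hx => hel x (List.mem_cons_of_mem _ hx)) (pvSet2 dp b 0 true)  hd'
    rw [List.foldl_cons]
    refine ⟨ihd, ?_⟩
    intro i j hi hj
    rw [ihv i j hi hj]
    rw [pvGet2_set2 dp _ _ b 0 i j true hd hb.1 hbR (le_refl 0) (by omega) hi hj]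
    simp only [List.mem_cons]
    by_cases hj0 : j = 0 <;> by_cases hit : i ∈ t <;> by_cases hib : i = b <;> simp_all

theorem pvInit_dims (n half : Int) (hh : 0 ≤ half) :
    pvDims (pvInit n half) (n+1).toNat (half+1).toNat := by
  refine (pv_init_fold n half _ (fun x hx => ?_) hh _ ⟨by simp, ?_⟩).1
  · exact (PySem.List.mem_pyRange_one.1 hx)
  · intro r hr
    rw [List.eq_of_mem_replicate hr, List.length_replicate]

theorem pv_init_eq (n half : Int) (hh : 0 ≤ half) (i j : Int) (hi : 0 ≤ i) (hj : 0 ≤ j) :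
    pvGet2 (pvInit n half) i j = if i < n+1 ∧ j = 0 then true else false := by
  rw [pvInit]
  have hbase : pvDims (List.replicate (n+1).toNat (List.replicate (half+1).toNat false))
      (n+1).toNat (half+1).toNat := by
    refine ⟨by simp, ?_⟩
    intro r hr
    rw [List.eq_of_mem_replicate hr, List.length_replicate]
  rw [(pv_init_fold n half _ (fun x hx => PySem.List.mem_pyRange_one.1 hx) hh _ hbase).2 i j hi hj]
  rw [pvGet2_base]
  simp only [PySem.List.mem_pyRange_one, Bool.if_false_right]
  by_cases h1 : i ≤ n <;> by_cases h2 : j = 0 <;> simp_all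

theorem pv_inner (arr : List Int) (n half i : Int) (hh : 0 ≤ half)
    (hi1 : 1 ≤ i) (hin : i ≤ n) (m : Nat) (hm : (m:Int) ≤ half) :
    ∀ (dp : List (List Bool)), pvDims dp (n+1).toNat (half+1).toNat →
    pvDims ((PySem.List.pyRange 1 ((m:Int)+1) 1).foldl (pvInnerF arr i) dp) (n+1).toNat (half+1).toNat
    ∧ ∀ (i' j' : Int), 0 ≤ i' → 0 ≤ j' →
      pvGet2 ((PySem.List.pyRange 1 ((m:Int)+1) 1).foldl (pvInnerF arr i) dp) i' j'
      = if i' = i ∧ 1 ≤ j' ∧ j' ≤ (m:Int) then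
          (if (PySem.List.pyGet? arr (i-1)).getD 0 ≤ j' then
             pvGet2 dp (i-1) j' || pvGet2 dp (i-1) (j'-(PySem.List.pyGet? arr (i-1)).getD 0)
           else pvGet2 dp (i-1) j')
        else pvGet2 dp i' j' := by
  induction m with
  | zero =>
    intro dp hd
    have h0 : PySem.List.pyRange 1 (((0:Nat):Int)+1) 1 = [] := by decide
    rw [h0, List.foldl_nil]
    refine ⟨hd, ?_⟩
    intro i' j' _ _
    rw [if_neg (by push_cast; omega)]
  | succ m ih =>
    intro dp hd
    have hm' : (m:Int) ≤ half := by push_cast at hm ⊢; omega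
    obtain ⟨ihd, ihv⟩ := ih hm' dp hd
    have hsplit : PySem.List.pyRange 1 (((m+1:Nat):Int)+1) 1
        = PySem.List.pyRange 1 ((m:Int)+1) 1 ++ [(m:Int)+1] := by
      rw [PySem.List.pyRange_one_succ_right (by push_cast; omega)]
      push_cast; ring_nf
    rw [hsplit, List.foldl_append, List.foldl_cons, List.foldl_nil]
    set a : Int := (PySem.List.pyGet? arr (i-1)).getD 0 with ha
    set dpm := (PySem.List.pyRange 1 ((m:Int)+1) 1).foldl (pvInnerF arr i) dp with hdpm
    -- reads of row i-1 are unchanged by the inner loop (it writes only row i)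
    have hrow : ∀ j'', 0 ≤ j'' → pvGet2 dpm (i-1) j'' = pvGet2 dp (i-1) j'' := by
      intro j'' hj''
      rw [ihv (i-1) j'' (by omega) hj'']
      rw [if_neg (by omega)]
    have hiR : i.toNat < (n+1).toNat := by omega
    have hjC : ((m:Int)+1).toNat < (half+1).toNat := by omega
    constructor
    · rw [pvInnerF]
      split_ifs <;> exact pvSet2_dims dpm _ _ i ((m:Int)+1) _ ihd (by omega) hiR
    · intro i' j' hi' hj'
      rw [pvInnerF]
      simp only [← ha, ge_iff_le]
      by_cases hav : a ≤ (m:Int)+1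
      · rw [if_pos hav]
        rw [pvGet2_set2 dpm _ _ i ((m:Int)+1) i' j' _ ihd (by omega) hiR (by omega) hjC hi' hj']
        by_cases hc : i' = i ∧ j' = (m:Int)+1
        · obtain ⟨hc1, rfl⟩ := hc
          have hcnd : i' = i ∧ (1:Int) ≤ (m:Int)+1 ∧ (m:Int)+1 ≤ ((m+1:Nat):Int) :=
            ⟨hc1, by omega, by push_cast; omega⟩
          rw [if_pos ⟨hc1, rfl⟩, if_pos hcnd, if_pos hav]
          rw [hrow _ (by omega), hrow _ (by omega)]
        · rw [if_neg hc, ihv i' j' hi' hj']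
          by_cases hc2 : i' = i ∧ 1 ≤ j' ∧ j' ≤ (m:Int)
          · have hcnd2 : i' = i ∧ (1:Int) ≤ j' ∧ j' ≤ ((m+1:Nat):Int) :=
              ⟨hc2.1, hc2.2.1, by push_cast; omega⟩
            rw [if_pos hc2, if_pos hcnd2]
          · rw [if_neg hc2, if_neg (by push_cast at hc hc2 ⊢; omega)]
      · rw [if_neg hav]
        rw [pvGet2_set2 dpm _ _ i ((m:Int)+1) i' j' _ ihd (by omega) hiR (by omega) hjC hi' hj']
        by_cases hc : i' = i ∧ j' = (m:Int)+1
        · obtain ⟨hc1, rfl⟩ := hc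
          have hcnd : i' = i ∧ (1:Int) ≤ (m:Int)+1 ∧ (m:Int)+1 ≤ ((m+1:Nat):Int) :=
            ⟨hc1, by omega, by push_cast; omega⟩
          rw [if_pos ⟨hc1, rfl⟩, if_pos hcnd, if_neg hav]
          rw [hrow _ (by omega)]
        · rw [if_neg hc, ihv i' j' hi' hj']
          by_cases hc2 : i' = i ∧ 1 ≤ j' ∧ j' ≤ (m:Int)
          · have hcnd2 : i' = i ∧ (1:Int) ≤ j' ∧ j' ≤ ((m+1:Nat):Int) :=
              ⟨hc2.1, hc2.2.1, by push_cast; omega⟩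
            rw [if_pos hc2, if_pos hcnd2]
          · rw [if_neg hc2, if_neg (by push_cast at hc hc2 ⊢; omega)]

theorem pv_table (n : Int) (arr : List Int) (half : Int)
    (hn : 0 ≤ n) (hnl : n ≤ arr.length) (hh : 0 ≤ half)
    (hpos : ∀ a ∈ arr.take n.toNat, 0 ≤ a) :
    ∀ (k : Nat), (k:Int) ≤ n →
    pvDims ((PySem.List.pyRange 1 ((k:Int)+1) 1).foldl (pvRowStep arr half) (pvInit n half))
      (n+1).toNat (half+1).toNat
    ∧ (∀ (i' j' : Int), 0 ≤ i' → i' ≤ (k:Int) → 0 ≤ j' → j' ≤ half →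
      pvGet2 ((PySem.List.pyRange 1 ((k:Int)+1) 1).foldl (pvRowStep arr half) (pvInit n half)) i' j'
        = decide (j' ∈ pvS half ((arr.take n.toNat).take i'.toNat)))
    ∧ (∀ (i' j' : Int), (k:Int) < i' → 0 ≤ j' →
      pvGet2 ((PySem.List.pyRange 1 ((k:Int)+1) 1).foldl (pvRowStep arr half) (pvInit n half)) i' j'
        = pvGet2 (pvInit n half) i' j') := by
  have hSb : ∀ (t : Nat), ∀ x ∈ pvS half ((arr.take n.toNat).take t), 0 ≤ x ∧ x ≤ half := by
    intro t
    refine pv_bounds half _ _ ?_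
    intro x hx
    have : x = 0 := by simpa [PySem.Set.mem_ofList] using hx
    omega
  intro k
  induction k with
  | zero =>
    intro _
    have hr : PySem.List.pyRange 1 (((0:Nat):Int)+1) 1 = [] := by decide
    rw [hr, List.foldl_nil]
    refine ⟨pvInit_dims n half hh, ?_, ?_⟩
    · intro i' j' h0 hle h0j hjh
      have hi0 : i' = 0 := by omega
      subst hi0
      rw [pv_init_eq n half hh 0 j' (le_refl 0) h0j]
      have ht : ((0:Int).toNat) = 0 := rfl
      rw [ht, List.take_zero]
      have hps : pvS half [] = PySem.Set.ofList [0] := rfl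
      rw [hps]
      by_cases hj : j' = 0
      · subst hj
        rw [if_pos ⟨by omega, rfl⟩]
        simp [PySem.Set.mem_ofList]
      · rw [if_neg (by tauto)]
        simp [PySem.Set.mem_ofList, hj]
    · intro i' j' _ _; rfl
  | succ m ih =>
    intro hk
    have hm : (m:Int) ≤ n := by push_cast at hk ⊢; omega
    have hmn : m < n.toNat := by omega
    obtain ⟨ihd, ihv, ihu⟩ := ih hm
    have hsplit : PySem.List.pyRange 1 (((m+1:Nat):Int)+1) 1
        = PySem.List.pyRange 1 ((m:Int)+1) 1 ++ [(m:Int)+1] := by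
      rw [PySem.List.pyRange_one_succ_right (by push_cast; omega)]
      push_cast; ring_nf
    rw [hsplit, List.foldl_append, List.foldl_cons, List.foldl_nil]
    set dpm := (PySem.List.pyRange 1 ((m:Int)+1) 1).foldl (pvRowStep arr half) (pvInit n half) with hdpm
    set a : Int := (PySem.List.pyGet? arr ((m:Int)+1-1)).getD 0 with ha_def
    have hlenpre : (arr.take n.toNat).length = n.toNat := by
      rw [List.length_take]; omega
    have hget : (arr.take n.toNat)[m]'(by omega) = a := by
      rw [ha_def]
      have h1 : (m:Int)+1-1 = ((m:Nat):Int) := by ring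
      rw [h1, PySem.List.pyGet?_natCast]
      have h2 : arr[m]? = some (arr[m]'(by omega)) := List.getElem?_eq_getElem _
      rw [h2]
      simp [List.getElem_take]
    have hanneg : 0 ≤ a := by
      rw [← hget]; exact hpos _ (List.getElem_mem _)
    have htake : (arr.take n.toNat).take (m+1) = (arr.take n.toNat).take m ++ [a] := by
      rw [List.take_succ_eq_append_getElem (by omega), hget]
    have hstep : pvS half ((arr.take n.toNat).take (m+1))
        = pvStep half (pvS half ((arr.take n.toNat).take m)) a := by
      rw [htake, pvS, List.foldl_append]; rfl
    have hhal : ((half.toNat:Nat):Int) = half := Int.toNat_of_nonneg hh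
    obtain ⟨hdims2, hvals2⟩ :=
      pv_inner arr n half ((m:Int)+1) hh (by omega) (by omega) half.toNat (by omega) dpm ihd
    have hrw : pvRowStep arr half dpm ((m:Int)+1)
        = (PySem.List.pyRange 1 (((half.toNat:Nat):Int)+1) 1).foldl (pvInnerF arr ((m:Int)+1)) dpm := by
      rw [pvRowStep, hhal]
    rw [hrw]
    have hm1 : (m:Int)+1-1 = ((m:Nat):Int) := by ring
    refine ⟨hdims2, ?_, ?_⟩
    · intro i' j' h0 hle h0j hjh
      rw [hvals2 i' j' h0 h0j]
      by_cases hcase : i' = (m:Int)+1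
      · subst hcase
        have htn : ((m:Int)+1).toNat = m+1 := by omega
        rw [htn]
        by_cases hj1 : 1 ≤ j'
        · rw [if_pos ⟨rfl, hj1, by omega⟩]
          rw [← ha_def]
          have hrd : ∀ (x : Int), 0 ≤ x → x ≤ half →
              pvGet2 dpm ((m:Int)+1-1) x
              = decide (x ∈ pvS half ((arr.take n.toNat).take m)) := by
            intro x hx1 hx2
            have := ihv ((m:Nat):Int) x (by omega) (by omega) hx1 hx2
            rw [hm1, this]
            norm_num
          rw [hstep]
          by_cases haj : a ≤ j'
          · rw [if_pos haj, hrd j' h0j hjh, hrd (j'-a) (by omega) (by omega)]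
            rw [Bool.eq_iff_iff]
            simp only [Bool.or_eq_true, decide_eq_true_eq]
            rw [pv_step_char half _ a j' hanneg (fun x hx => (hSb m x hx).1)]
            constructor
            · rintro (h | h)
              · exact Or.inl h
              · exact Or.inr ⟨haj, hjh, h⟩
            · rintro (h | ⟨_, _, h⟩)
              · exact Or.inl h
              · exact Or.inr h
          · rw [if_neg haj, hrd j' h0j hjh]
            rw [Bool.eq_iff_iff]
            simp only [decide_eq_true_eq]
            rw [pv_step_char half _ a j' hanneg (fun x hx => (hSb m x hx).1)]
            constructor
            · exact Or.inl
            · rintro (h | ⟨h1, _, _⟩)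
              · exact h
              · omega
        · -- j' = 0
          have hj0 : j' = 0 := by omega
          subst hj0
          rw [if_neg (by omega)]
          have hd : pvGet2 dpm ((m:Int)+1) 0 = pvGet2 (pvInit n half) ((m:Int)+1) 0 :=
            ihu ((m:Int)+1) 0 (by omega) (le_refl 0)
          rw [hd, pv_init_eq n half hh ((m:Int)+1) 0 (by omega) (le_refl 0),
            if_pos ⟨by omega, rfl⟩]
          have hmem0 : (0:Int) ∈ pvS half ((arr.take n.toNat).take (m+1)) := by
            apply pv_zero_mem
            simp [PySem.Set.mem_ofList]
          simp [hmem0]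
      · -- i' ≤ m : row untouched by this step
        rw [if_neg (by tauto)]
        exact ihv i' j' h0 (by push_cast at hle; omega) h0j hjh
    · intro i' j' hgt h0j
      push_cast at hgt
      rw [hvals2 i' j' (by omega) h0j, if_neg (by omega), ihu i' j' (by omega) h0j]

theorem pv_foldl_rows_id (arr : List Int) (l : List Int) :
    ∀ dp, l.foldl (pvRowStep arr 0) dp = dp := by
  induction l with
  | nil => intro dp; rfl
  | cons b t ih =>
    intro dp
    rw [List.foldl_cons]
    have hstep : pvRowStep arr 0 dp b = dp := by
      rw [pvRowStep]
      have h0 : PySem.List.pyRange 1 ((0:Int)+1) 1 = [] := by decide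
      rw [h0, List.foldl_nil]
    rw [hstep, ih]

-- ---------- B side: the first-index dictionary ----------

-- characterization of one pass of B's inner loop over a key snapshot
theorem pvRowB_get? (half i a : Int) : ∀ (ks : List Int) (d : PySem.Dict Int Int) (x : Int),
    (ks.foldl (fun d' j =>
      let t := j + a
      if 0 ≤ t ∧ t ≤ half ∧ d'.contains t = false then d'.insert t i else d') d).get? x
    = if (d.get? x).isSome then d.get? x
      else if 0 ≤ x ∧ x ≤ half ∧ ∃ j ∈ ks, j + a = x then some i else none := by
  intro ks
  induction ks with
  | nil =>
    intro d x
    simp only [List.foldl_nil, List.not_mem_nil]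
    cases d.get? x <;> simp
  | cons j ks ih =>
    intro d x
    rw [List.foldl_cons]
    simp only []
    have hmem : x ≠ j + a → ((0 ≤ x ∧ x ≤ half ∧ ∃ j' ∈ ks, j' + a = x)
        ↔ (0 ≤ x ∧ x ≤ half ∧ ∃ j' ∈ j :: ks, j' + a = x)) := by
      intro hx
      refine and_congr_right fun _ => and_congr_right fun _ => ?_
      constructor
      · rintro ⟨j', hj', rfl⟩; exact ⟨j', List.mem_cons_of_mem _ hj', rfl⟩
      · rintro ⟨j', hj', rfl⟩
        rcases List.mem_cons.1 hj' with rfl | h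
        · exact absurd rfl hx
        · exact ⟨j', h, rfl⟩
    by_cases hc : 0 ≤ j + a ∧ j + a ≤ half ∧ d.contains (j + a) = false
    · rw [if_pos hc]
      rw [ih]
      have hdj : d.get? (j + a) = none := (PySem.Dict.get?_eq_none_iff_contains d _).2 hc.2.2
      by_cases hx : x = j + a
      · subst hx
        rw [PySem.Dict.get?_insert_self]
        simp only [Option.isSome_some, if_true, hdj, Option.isSome_none,
          Bool.false_eq_true, if_false]
        rw [if_pos ⟨hc.1, hc.2.1, j, List.mem_cons_self, rfl⟩]
      · rw [PySem.Dict.get?_insert_of_ne d i hx]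
        cases hdx : d.get? x with
        | some v => simp
        | none =>
          simp only [Option.isSome_none, Bool.false_eq_true, if_false]
          rw [if_congr (hmem hx) rfl rfl]
    · rw [if_neg hc]
      rw [ih]
      cases hdx : d.get? x with
      | some v => simp
      | none =>
        simp only [Option.isSome_none, Bool.false_eq_true, if_false]
        by_cases hx : x = j + a
        · subst hx
          have hcont : d.contains (j + a) = false :=
            (PySem.Dict.get?_eq_none_iff_contains d _).1 hdx
          have hrange : ¬ (0 ≤ j + a ∧ j + a ≤ half) := fun hr => hc ⟨hr.1, hr.2, hcont⟩
          rw [if_neg (fun h => hrange ⟨h.1, h.2.1⟩), if_neg (fun h => hrange ⟨h.1, h.2.1⟩)]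
        · rw [if_congr (hmem hx) rfl rfl]

-- the dictionary invariant: first maps j to the LEAST prefix length reaching j
def pvInv (half : Int) (pref : List Int) (k : Nat) (d : PySem.Dict Int Int) : Prop :=
  ∀ (j v : Int), d.get? j = some v ↔
    ∃ m : Nat, v = (m:Int) ∧ m ≤ k ∧ j ∈ pvS half (pref.take m)
      ∧ ∀ l < m, j ∉ pvS half (pref.take l)

theorem pvInv_isSome (half : Int) (pref : List Int) (k : Nat) (d : PySem.Dict Int Int)
    (hinv : pvInv half pref k d) (j : Int) :
    (d.get? j).isSome = true ↔ j ∈ pvS half (pref.take k) := by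
  constructor
  · intro h
    obtain ⟨v, hv⟩ := Option.isSome_iff_exists.1 h
    obtain ⟨m, _, hmk, hmem, _⟩ := (hinv j v).1 hv
    exact pv_mono_take half pref m k j hmk hmem
  · intro h
    have hex : ∃ m : Nat, j ∈ pvS half (pref.take m) := ⟨k, h⟩
    have hfind := Nat.find_spec hex
    have hle : Nat.find hex ≤ k := Nat.find_min' hex h
    have := (hinv j (Nat.find hex : Nat)).2
      ⟨Nat.find hex, rfl, hle, hfind, fun l hl => Nat.find_min hex hl⟩
    rw [this]; rfl

theorem pvInv_zero (half : Int) (pref : List Int) (k : Nat) (d : PySem.Dict Int Int)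
    (hinv : pvInv half pref k d) : d.get? 0 = some 0 := by
  have h0 : (0:Int) ∈ pvS half (pref.take 0) := by
    simp [pvS, PySem.Set.mem_ofList]
  exact (hinv 0 ((0:Nat):Int)).2 ⟨0, rfl, Nat.zero_le _, h0, by omega⟩

-- the build loop establishes pvInv
theorem pv_build (n : Int) (arr : List Int) (half : Int)
    (hn : 0 ≤ n) (hnl : n ≤ arr.length) :
    ∀ (k : Nat), (k:Int) ≤ n →
    pvInv half (arr.take n.toNat) k
      ((PySem.List.pyRange 1 ((k:Int)+1) 1).foldl
        (fun d i => pvRowB half i ((PySem.List.pyGet? arr (i-1)).getD 0) d)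
        (PySem.Dict.empty.insert 0 0)) := by
  have hlenpre : (arr.take n.toNat).length = n.toNat := by
    rw [List.length_take]; omega
  intro k
  induction k with
  | zero =>
    intro _
    have hr : PySem.List.pyRange 1 (((0:Nat):Int)+1) 1 = [] := by decide
    rw [hr, List.foldl_nil]
    intro j v
    rw [PySem.Dict.get?_insert]
    constructor
    · intro h
      by_cases hj : j = 0
      · subst hj
        rw [if_pos rfl] at h
        refine ⟨0, by simpa using h.symm, le_refl 0, ?_, by omega⟩
        simp [pvS, PySem.Set.mem_ofList]
      · rw [if_neg hj] at h
        exact absurd h (by simp)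
    · rintro ⟨m, rfl, hm0, hmem, _⟩
      have hm : m = 0 := by omega
      subst hm
      have : j = 0 := by simpa [pvS, PySem.Set.mem_ofList] using hmem
      subst this
      rw [if_pos rfl]
      rfl
  | succ m ih =>
    intro hk
    have hm : (m:Int) ≤ n := by push_cast at hk ⊢; omega
    have hmn : m < n.toNat := by omega
    have hinv := ih hm
    have hsplit : PySem.List.pyRange 1 (((m+1:Nat):Int)+1) 1
        = PySem.List.pyRange 1 ((m:Int)+1) 1 ++ [(m:Int)+1] := by
      rw [PySem.List.pyRange_one_succ_right (by push_cast; omega)]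
      push_cast; ring_nf
    rw [hsplit, List.foldl_append, List.foldl_cons, List.foldl_nil]
    set d := (PySem.List.pyRange 1 ((m:Int)+1) 1).foldl
        (fun d i => pvRowB half i ((PySem.List.pyGet? arr (i-1)).getD 0) d)
        (PySem.Dict.empty.insert 0 0) with hd
    set a : Int := (PySem.List.pyGet? arr ((m:Int)+1-1)).getD 0 with ha_def
    have hget : (arr.take n.toNat)[m]'(by omega) = a := by
      rw [ha_def]
      have h1 : (m:Int)+1-1 = ((m:Nat):Int) := by ring
      rw [h1, PySem.List.pyGet?_natCast]
      have h2 : arr[m]? = some (arr[m]'(by omega)) := List.getElem?_eq_getElem _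
      rw [h2]
      simp [List.getElem_take]
    have htake : (arr.take n.toNat).take (m+1) = (arr.take n.toNat).take m ++ [a] := by
      rw [List.take_succ_eq_append_getElem (by omega), hget]
    have hstepS : pvS half ((arr.take n.toNat).take (m+1))
        = pvStep half (pvS half ((arr.take n.toNat).take m)) a := by
      rw [htake, pvS, List.foldl_append]; rfl
    -- keys of d are exactly pvS … (take m)
    have hkeys : ∀ x : Int, x ∈ d.keys ↔ x ∈ pvS half ((arr.take n.toNat).take m) := by
      intro x
      rw [← pvInv_isSome half _ m d hinv x]
      constructor
      · intro h
        have := (PySem.Dict.contains_iff_mem_keys d x).2 h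
        rw [PySem.Dict.contains_eq_isSome_get?] at this
        exact this
      · intro h
        apply (PySem.Dict.contains_iff_mem_keys d x).1
        rw [PySem.Dict.contains_eq_isSome_get?]
        exact h
    intro j v
    rw [pvRowB, pvRowB_get? half ((m:Int)+1) a d.keys d j]
    by_cases hsome : (d.get? j).isSome
    · rw [if_pos hsome]
      obtain ⟨v0, hv0⟩ := Option.isSome_iff_exists.1 hsome
      obtain ⟨m0, hvm0, hm0, hmem0, hleast0⟩ := (hinv j v0).1 hv0
      rw [hv0]
      constructor
      · intro h
        have hvv : v = v0 := by injection h; omega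
        subst hvv
        exact ⟨m0, hvm0, by omega, hmem0, hleast0⟩
      · rintro ⟨m1, rfl, hm1, hmem1, hleast1⟩
        -- least index is unique
        have : m1 = m0 := by
          rcases Nat.lt_trichotomy m1 m0 with h | h | h
          · exact absurd hmem1 (hleast0 _ h)
          · exact h
          · exact absurd hmem0 (hleast1 _ h)
        subst this
        rw [hvm0]
    · rw [if_neg hsome]
      have hjnot : j ∉ pvS half ((arr.take n.toNat).take m) := by
        intro hj
        exact hsome ((pvInv_isSome half _ m d hinv j).2 hj)
      by_cases hcond : 0 ≤ j ∧ j ≤ half ∧ ∃ x ∈ d.keys, x + a = j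
      · rw [if_pos hcond]
        have hjmem : j ∈ pvS half ((arr.take n.toNat).take (m+1)) := by
          rw [hstepS]
          obtain ⟨x, hx, hxa⟩ := hcond.2.2
          exact (pv_mem_step half _ a j).2 (Or.inr ⟨x, (hkeys x).1 hx, hxa, hcond.1, hcond.2.1⟩)
        constructor
        · intro h
          have hvv : v = ((m:Int)+1) := by injection h; omega
          subst hvv
          refine ⟨m+1, by push_cast; ring, le_refl _, hjmem, ?_⟩
          intro l hl hmem
          exact hjnot (pv_mono_take half _ l m j (by omega) hmem)
        · rintro ⟨m1, rfl, hm1, hmem1, hleast1⟩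
          have : m1 = m+1 := by
            rcases Nat.lt_or_ge m1 (m+1) with h | h
            · exact absurd (pv_mono_take half _ m1 m j (by omega) hmem1) hjnot
            · have := hleast1 (m+1)
              rcases Nat.lt_or_ge (m+1) m1 with h2 | h2
              · exact absurd hjmem (this h2)
              · omega
          subst this
          push_cast
          rfl
      · rw [if_neg hcond]
        have hjnot1 : j ∉ pvS half ((arr.take n.toNat).take (m+1)) := by
          rw [hstepS]
          intro hj
          rcases (pv_mem_step half _ a j).1 hj with h | ⟨x, hx, hxa, h0, h1⟩
          · exact hjnot h
          · exact hcond ⟨h0, h1, x, (hkeys x).2 hx, hxa⟩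
        constructor
        · intro h; exact absurd h (by simp)
        · rintro ⟨m1, rfl, hm1, hmem1, hleast1⟩
          exfalso
          rcases Nat.lt_or_ge m1 (m+1) with h | h
          · exact hjnot (pv_mono_take half _ m1 m j (by omega) hmem1)
          · have : m1 = m+1 := by omega
            subst this
            exact hjnot1 hmem1

-- the reconstruction test: first[j] == i  iff  j was not reachable one step earlier
theorem pvInv_test (half : Int) (pref : List Int) (N : Nat) (d : PySem.Dict Int Int)
    (hinv : pvInv half pref N d) (k : Nat) (j : Int) (hkN : k < N)
    (hj : j ∈ pvS half (pref.take (k+1))) :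
    ((d.get? j).getD 0 = ((k+1:Nat):Int)) ↔ j ∉ pvS half (pref.take k) := by
  have hjN : j ∈ pvS half (pref.take N) := pv_mono_take half pref (k+1) N j (by omega) hj
  have hsome := (pvInv_isSome half pref N d hinv j).2 hjN
  obtain ⟨v, hv⟩ := Option.isSome_iff_exists.1 hsome
  obtain ⟨m, rfl, hmN, hmem, hleast⟩ := (hinv j v).1 hv
  rw [hv]
  simp only [Option.getD_some]
  constructor
  · intro h hk
    have hm : m = k+1 := by exact_mod_cast h
    subst hm
    exact hleast k (by omega) hk
  · intro h
    have hge : k+1 ≤ m := by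
      by_contra hlt
      exact h (pv_mono_take half pref m k j (by omega) hmem)
    have hle : m ≤ k+1 := by
      by_contra hgt
      exact hleast (k+1) (by omega) hj
    have : m = k+1 := by omega
    subst this
    rfl

-- reconstruction when j = 0: both loops change nothing
theorem pv_reconB_noop (arr : List Int) (first : PySem.Dict Int Int)
    (h0 : first.get? 0 = some 0) :
    ∀ (m : Nat) (acc : List Int),
      (PySem.List.pyRange (m:Int) 0 (-1)).foldl (pvReconB arr first) ((0:Int), acc)
      = (0, acc) := by
  intro m
  induction m with
  | zero =>
    intro acc
    have hr : PySem.List.pyRange ((0:Nat):Int) 0 (-1) = [] := by decide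
    rw [hr, List.foldl_nil]
  | succ m ih =>
    intro acc
    have hcons : PySem.List.pyRange (((m+1:Nat)):Int) 0 (-1)
        = ((m+1:Nat):Int) :: PySem.List.pyRange (((m+1:Nat):Int)-1) 0 (-1) :=
      PySem.List.pyRange_neg_one_cons (by push_cast; omega)
    have hc1 : (((m+1:Nat):Int)-1) = ((m:Nat):Int) := by push_cast; ring
    rw [hcons, hc1, List.foldl_cons]
    have hstep : pvReconB arr first ((0:Int), acc) ((m+1:Nat):Int) = (0, acc) := by
      rw [pvReconB]
      rw [if_neg (by rw [h0]; simp; omega)]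
    rw [hstep]
    exact ih acc

-- the two reconstructions agree
theorem pv_reconB (arr : List Int) (n half : Int) (first : PySem.Dict Int Int)
    (dp2 : List (List Bool)) (hnl : n ≤ arr.length) (hn : 0 ≤ n)
    (hdp : ∀ (k : Nat) (j : Int), (k:Int) ≤ n → 0 ≤ j → j ≤ half →
            pvGet2 dp2 (k:Int) j = decide (j ∈ pvS half ((arr.take n.toNat).take k)))
    (hinv : pvInv half (arr.take n.toNat) n.toNat first)
    (hbound : ∀ (k : Nat), ∀ x ∈ pvS half ((arr.take n.toNat).take k), 0 ≤ x ∧ x ≤ half)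
    (hposl : ∀ a ∈ arr.take n.toNat, 0 ≤ a) :
    ∀ (k : Nat) (j : Int) (acc : List Int), (k:Int) ≤ n → 0 ≤ j → j ≤ half →
      j ∈ pvS half ((arr.take n.toNat).take k) →
      pvWhileA arr dp2 k (k:Int) j acc
      = ((PySem.List.pyRange (k:Int) 0 (-1)).foldl (pvReconB arr first) (j, acc)).2 := by
  have hlenpre : (arr.take n.toNat).length = n.toNat := by
    rw [List.length_take]; omega
  intro k
  induction k with
  | zero =>
    intro j acc _ _ _ _
    have hr : PySem.List.pyRange ((0:Nat):Int) 0 (-1) = [] := by decide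
    rw [hr, List.foldl_nil, pvWhileA]
  | succ k ih =>
    intro j acc hk h0j hjh hmem
    have hk' : (k:Int) ≤ n := by push_cast at hk ⊢; omega
    have hkn : k < n.toNat := by omega
    have hcons : PySem.List.pyRange (((k+1:Nat)):Int) 0 (-1)
        = ((k+1:Nat):Int) :: PySem.List.pyRange (((k+1:Nat):Int)-1) 0 (-1) :=
      PySem.List.pyRange_neg_one_cons (by push_cast; omega)
    have hc1 : (((k+1:Nat):Int)-1) = ((k:Nat):Int) := by push_cast; ring
    have hgeta : (PySem.List.pyGet? arr (((k+1:Nat):Int)-1)).getD 0 = (arr.take n.toNat)[k]'(by omega) := by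
      rw [hc1, PySem.List.pyGet?_natCast]
      have h2 : arr[k]? = some (arr[k]'(by omega)) := List.getElem?_eq_getElem _
      rw [h2]
      simp [List.getElem_take]
    have hanneg : 0 ≤ (arr.take n.toNat)[k]'(by omega) := hposl _ (List.getElem_mem _)
    have htake : (arr.take n.toNat).take (k+1) = (arr.take n.toNat).take k ++ [(arr.take n.toNat)[k]'(by omega)] :=
      List.take_succ_eq_append_getElem (by omega)
    have hstepS : pvS half ((arr.take n.toNat).take (k+1))
        = pvStep half (pvS half ((arr.take n.toNat).take k)) ((arr.take n.toNat)[k]'(by omega)) := by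
      rw [htake, pvS, List.foldl_append]; rfl
    have htest := pvInv_test half (arr.take n.toNat) n.toNat first hinv k j hkn hmem
    by_cases hj0 : j = 0
    · subst hj0
      rw [pvWhileA, if_neg (by omega)]
      rw [pv_reconB_noop arr first (pvInv_zero half _ _ first hinv) (k+1) acc]
    · have hjpos : 0 < j := by omega
      rw [pvWhileA, if_pos ⟨by push_cast; omega, hjpos⟩]
      rw [hcons, List.foldl_cons]
      have hdpk : pvGet2 dp2 (((k+1:Nat):Int)-1) j
          = decide (j ∈ pvS half ((arr.take n.toNat).take k)) := by
        rw [hc1]; exact hdp k j hk' h0j hjh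
      by_cases hmemk : j ∈ pvS half ((arr.take n.toNat).take k)
      · -- dp[i-1][j] is True: skip this element on both sides
        rw [hdpk]
        simp only [hmemk, decide_true]
        rw [if_neg (by simp)]
        have hbstep : pvReconB arr first (j, acc) ((k+1:Nat):Int) = (j, acc) := by
          rw [pvReconB, if_neg (by intro h; exact (htest.1 h) hmemk)]
        rw [hbstep, hc1]
        exact ih j acc hk' h0j hjh hmemk
      · -- dp[i-1][j] is False: both sides take arr[i-1]
        rw [hdpk]
        simp only [hmemk, decide_false]
        rw [if_pos trivial]
        have hchar := (pv_step_char half (pvS half ((arr.take n.toNat).take k))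
            ((arr.take n.toNat)[k]'(by omega)) j hanneg
            (fun x hx => (hbound k x hx).1)).1 (hstepS ▸ hmem)
        have hsub : (arr.take n.toNat)[k]'(by omega) ≤ j
            ∧ (j - (arr.take n.toNat)[k]'(by omega)) ∈ pvS half ((arr.take n.toNat).take k) := by
          rcases hchar with h | ⟨h1, _, h3⟩
          · exact absurd h hmemk
          · exact ⟨h1, h3⟩
        have hb2 := hbound k _ hsub.2
        have hbstep : pvReconB arr first (j, acc) ((k+1:Nat):Int)
            = (j - (arr.take n.toNat)[k]'(by omega), acc ++ [(arr.take n.toNat)[k]'(by omega)]) := by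
          rw [pvReconB, if_pos (htest.2 hmemk), hgeta]
        rw [hbstep, hgeta, hc1]
        exact ih (j - (arr.take n.toNat)[k]'(by omega)) (acc ++ [(arr.take n.toNat)[k]'(by omega)])
          hk' (by omega) (by omega) hsub.2

-- ===== VERDICT (by name: the statement is the Claim_ definition above) =====
theorem two_subsequences_spec : Claim_equal_two_subsequences := by
  intro n arr _hdom hpre
  show two_subsequences n arr = two_subsequences_alt n arr
  simp only [two_subsequences, two_subsequences_alt]
  by_cases hodd : PySem.Int.mod arr.sum 2 ≠ 0
  · rw [if_pos hodd, if_pos hodd]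
  · rw [if_neg hodd, if_neg hodd]
    rw [not_not] at hodd
    rcases hpre with h | ⟨hn, hnl, hcase⟩
    · exact absurd hodd h
    have hcast : ((n.toNat:Nat):Int) = n := Int.toNat_of_nonneg hn
    have hlenpre : (arr.take n.toNat).length = n.toNat := by
      rw [List.length_take]; omega
    -- B's first dictionary and its invariant
    have hinv0 := pv_build n arr (PySem.Int.floordiv arr.sum 2) hn hnl n.toNat (by omega)
    rw [hcast] at hinv0
    have hbf : pvBuildFirst n arr (PySem.Int.floordiv arr.sum 2)
        = (PySem.List.pyRange 1 (n+1) 1).foldl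
            (fun d i => pvRowB (PySem.Int.floordiv arr.sum 2) i ((PySem.List.pyGet? arr (i-1)).getD 0) d)
            (PySem.Dict.empty.insert 0 0) := rfl
    have hinv : pvInv (PySem.Int.floordiv arr.sum 2) (arr.take n.toNat) n.toNat
        (pvBuildFirst n arr (PySem.Int.floordiv arr.sum 2)) := by
      rw [hbf]; exact hinv0
    set first := pvBuildFirst n arr (PySem.Int.floordiv arr.sum 2) with hfirst
    -- B's feasibility test reads membership of half in the final reachable set
    have hcontains : first.contains (PySem.Int.floordiv arr.sum 2)
        = decide ((PySem.Int.floordiv arr.sum 2)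
            ∈ pvS (PySem.Int.floordiv arr.sum 2) ((arr.take n.toNat).take n.toNat)) := by
      rw [PySem.Dict.contains_eq_isSome_get?]
      rw [Bool.eq_iff_iff]
      simp only [decide_eq_true_eq]
      exact pvInv_isSome _ _ _ first hinv _
    rcases hcase with hs0 | ⟨hspos, hposp⟩
    · -- total 0: half = 0, both sides return []
      have hh0 : PySem.Int.floordiv arr.sum 2 = 0 := by rw [hs0]; decide
      rw [hh0] at hcontains hinv ⊢
      -- A side
      have htab : pvTable n arr 0 = pvInit n 0 := by
        rw [pvTable]; exact pv_foldl_rows_id arr _ _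
      have hdptrue : pvGet2 (pvTable n arr 0) n 0 = true := by
        rw [htab, pv_init_eq n 0 (le_refl 0) n 0 hn (le_refl 0), if_pos ⟨by omega, rfl⟩]
      rw [hdptrue, if_neg (by simp)]
      -- B side
      have hzm : (0:Int) ∈ pvS 0 ((arr.take n.toNat).take n.toNat) := by
        apply pv_zero_mem
        simp [PySem.Set.mem_ofList]
      rw [hcontains, if_neg (by simp [hzm])]
      have hnoop := pv_reconB_noop arr first (pvInv_zero 0 _ _ first hinv) n.toNat ([] : List Int)
      rw [hcast] at hnoop
      rw [hnoop]
      -- A's while loop with j = 0 returns []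
      cases hnt : n.toNat with
      | zero => rfl
      | succ k => rw [pvWhileA, if_neg (by omega)]
    · -- total > 0: dp table equals prefix reachability; reconstructions agree
      have hh : 0 ≤ PySem.Int.floordiv arr.sum 2 := by
        have := PySem.Int.floordiv_mul_add_mod arr.sum 2
        rw [hodd] at this
        omega
      have htable := pv_table n arr (PySem.Int.floordiv arr.sum 2) hn hnl hh hposp n.toNat (by omega)
      have hdp : ∀ (k : Nat) (j : Int), (k:Int) ≤ n → 0 ≤ j → j ≤ PySem.Int.floordiv arr.sum 2 →
          pvGet2 (pvTable n arr (PySem.Int.floordiv arr.sum 2)) (k:Int) j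
          = decide (j ∈ pvS (PySem.Int.floordiv arr.sum 2) ((arr.take n.toNat).take k)) := by
        intro k j hk h0j hjh
        have := htable.2.1 ((k:Nat):Int) j (by omega) (by omega) h0j hjh
        rw [hcast] at this
        rw [pvTable, this]
        norm_num
      have hbound : ∀ (k : Nat), ∀ x ∈ pvS (PySem.Int.floordiv arr.sum 2) ((arr.take n.toNat).take k),
          0 ≤ x ∧ x ≤ PySem.Int.floordiv arr.sum 2 := by
        intro k
        apply pv_bounds
        intro x hx
        have : x = 0 := by simpa [PySem.Set.mem_ofList] using hx
        omega
      -- the two feasibility tests compute the same boolean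
      have hAtest : pvGet2 (pvTable n arr (PySem.Int.floordiv arr.sum 2)) n (PySem.Int.floordiv arr.sum 2)
          = decide ((PySem.Int.floordiv arr.sum 2)
              ∈ pvS (PySem.Int.floordiv arr.sum 2) ((arr.take n.toNat).take n.toNat)) := by
        have h := hdp n.toNat (PySem.Int.floordiv arr.sum 2) (by omega) hh (le_refl _)
        rw [hcast] at h
        exact h
      rw [hAtest, hcontains]
      by_cases hfound : decide ((PySem.Int.floordiv arr.sum 2)
          ∈ pvS (PySem.Int.floordiv arr.sum 2) ((arr.take n.toNat).take n.toNat)) = false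
      · rw [if_pos hfound, if_pos hfound]
      · rw [if_neg hfound, if_neg hfound]
        have hmem : PySem.Int.floordiv arr.sum 2
            ∈ pvS (PySem.Int.floordiv arr.sum 2) ((arr.take n.toNat).take n.toNat) := by
          simpa using hfound
        have hrec := pv_reconB arr n (PySem.Int.floordiv arr.sum 2) first
          (pvTable n arr (PySem.Int.floordiv arr.sum 2)) hnl hn
          (by intro k j hk h0j hjh; exact hdp k j hk h0j hjh) hinv hbound hposp
          n.toNat (PySem.Int.floordiv arr.sum 2) [] (by omega) hh (le_refl _) hmem
        rw [hcast] at hrec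
        exact hrec
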